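-- pv_equiv track=rewrite | github.com/honu-shell-utions/python | sandbox/project_euler/801-850/828_number_challenge02.py | solve
-- ===== SOURCE A (Python) =====
-- def solve(xs, target):
--   if xs == [target]:
--     return True
--   for i, x in enumerate(xs):
--     for j, y in enumerate(xs[:i]):
--       zs = set(z for z in [x+y, x-y, y-x, x*y] if z > 0)
--       if x%y == 0:
--         zs.add(x//y)
--       if y%x == 0:
--         zs.add(y//x)
--       if any(solve(xs[:j] + xs[j+1:i] + xs[i+1:] + [z], target) for z in zs):
--         return True
--   return False
-- ===== SOURCE B (Python) =====
-- def solve(xs, target):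
--     # Memoized search: states canonicalized to sorted tuples so permuted
--     # intermediate multisets are computed once instead of exponentially often.
--     memo = {}
--
--     def reach(ms):
--         r = memo.get(ms)
--         if r is not None:
--             return r
--         if len(ms) == 1:
--             res = ms[0] == target
--         else:
--             res = False
--             for i in range(len(ms)):
--                 for j in range(i):
--                     x, y = ms[i], ms[j]
--                     cands = {z for z in (x + y, x - y, y - x, x * y) if z > 0}
--                     if x % y == 0:
--                         cands.add(x // y)
--                     if y % x == 0:
--                         cands.add(y // x)
--                     rest = ms[:j] + ms[j + 1:i] + ms[i + 1:]
--                     if any(reach(tuple(sorted(rest + (z,)))) for z in cands):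
--                         res = True
--                         break
--                 if res:
--                     break
--         memo[ms] = res
--         return res
--
--     if xs == [target]:
--         return True
--     return reach(tuple(sorted(xs)))
-- ===== Notes on version B (the rewrite author's own statement) =====
-- stated objective: faster
-- what changed: B replaces A's plain exponential recursion with memoized search keyed by the canonical sorted tuple of the remaining numbers, so permuted intermediate multisets are solved once instead of being re-explored exponentially often.
import Mathlib
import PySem

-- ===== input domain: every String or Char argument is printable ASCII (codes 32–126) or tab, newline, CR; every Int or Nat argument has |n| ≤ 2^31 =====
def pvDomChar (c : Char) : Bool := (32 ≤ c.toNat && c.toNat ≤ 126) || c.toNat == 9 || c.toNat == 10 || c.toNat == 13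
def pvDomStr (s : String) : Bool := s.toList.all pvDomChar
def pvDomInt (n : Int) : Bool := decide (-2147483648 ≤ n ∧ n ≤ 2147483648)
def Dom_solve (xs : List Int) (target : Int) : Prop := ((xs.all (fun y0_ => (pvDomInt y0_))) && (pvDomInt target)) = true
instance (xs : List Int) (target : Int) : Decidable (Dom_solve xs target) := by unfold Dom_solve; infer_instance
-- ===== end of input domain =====

-- B memoizes the search on sorted-tuple canonical states; A re-explores permuted states exponentially often.

-- ===== PORT A =====
-- candidate results of combining x and y (identical expression in both Pythons:
-- set(z for z in [x+y, x-y, y-x, x*y] if z > 0), plus exact quotients)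
def pvCands (x y : Int) : PySem.Set Int :=
  let zs := PySem.Set.ofList (([x + y, x - y, y - x, x * y]).filter (fun z => decide (0 < z)))
  let zs := if PySem.Int.mod x y = 0 then PySem.Set.add zs (PySem.Int.floordiv x y) else zs
  if PySem.Int.mod y x = 0 then PySem.Set.add zs (PySem.Int.floordiv y x) else zs

-- A's recursion, with a fuel parameter for termination (fuel = length + 1 always suffices:
-- every recursive call shrinks the list by one; the guard never fires on the actual calls)
def solveA (t : Int) : Nat → List Int → Bool
  | 0, _ => false
  | f + 1, xs =>
    if xs = [t] then true
    else
      (PySem.List.enumerate xs).any (fun p =>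
        (PySem.List.enumerate (PySem.List.slice xs none (some p.1))).any (fun q =>
          (pvCands p.2 q.2).any (fun z =>
            solveA t f (PySem.List.slice xs none (some q.1) ++
              PySem.List.slice xs (some (q.1 + 1)) (some p.1) ++
              PySem.List.slice xs (some (p.1 + 1)) none ++ [z]))))

def solve (xs : List Int) (target : Int) : Bool := solveA target (xs.length + 1) xs

-- ===== PORT B =====
-- B (Source B): memoized recursion on canonical sorted states.  The three nested Python loops
-- (for i / for j / any over candidates) thread the memo dict and break on the first success.
def pvCandLoop (rec : PySem.Dict (List Int) Bool → List Int → Bool × PySem.Dict (List Int) Bool)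
    (rest : List Int) :
    List Int → PySem.Dict (List Int) Bool → Bool × PySem.Dict (List Int) Bool
  | [], m => (false, m)
  | z :: zs, m =>
    match rec m (PySem.List.sorted (rest ++ [z]) (fun v => v) false) with
    | (r, m2) => if r then (true, m2) else pvCandLoop rec rest zs m2

def pvJLoop (rec : PySem.Dict (List Int) Bool → List Int → Bool × PySem.Dict (List Int) Bool)
    (ms : List Int) (i : Int) :
    List Int → PySem.Dict (List Int) Bool → Bool × PySem.Dict (List Int) Bool
  | [], m => (false, m)
  | j :: js, m =>
    -- ms[i], ms[j]: indices produced by range(...) are always in bounds, so getD is exact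
    let x := PySem.List.pyGetD ms i 0
    let y := PySem.List.pyGetD ms j 0
    let rest := PySem.List.slice ms none (some j) ++
      PySem.List.slice ms (some (j + 1)) (some i) ++ PySem.List.slice ms (some (i + 1)) none
    match pvCandLoop rec rest (pvCands x y) m with
    | (r, m2) => if r then (true, m2) else pvJLoop rec ms i js m2

def pvILoop (rec : PySem.Dict (List Int) Bool → List Int → Bool × PySem.Dict (List Int) Bool)
    (ms : List Int) :
    List Int → PySem.Dict (List Int) Bool → Bool × PySem.Dict (List Int) Bool
  | [], m => (false, m)
  | i :: is, m =>
    match pvJLoop rec ms i (PySem.List.pyRange 0 i 1) m with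
    | (r, m2) => if r then (true, m2) else pvILoop rec ms is m2

-- reach(ms) with a fuel parameter (fuel = length + 1 suffices; states shrink by one per level)
def pvReach (t : Int) : Nat → PySem.Dict (List Int) Bool → List Int → Bool × PySem.Dict (List Int) Bool
  | 0, m, _ => (false, m)
  | f + 1, m, ms =>
    match PySem.Dict.get? m ms with
    | some r => (r, m)
    | none =>
      match (if ms.length = 1 then (PySem.List.pyGetD ms 0 0 == t, m)
             else pvILoop (pvReach t f) ms (PySem.List.pyRange 0 (ms.length : Int) 1) m) with
      | (r, m2) => (r, PySem.Dict.insert m2 ms r)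

def solve_alt (xs : List Int) (target : Int) : Bool :=
  if xs = [target] then true
  else (pvReach target (xs.length + 1) PySem.Dict.empty
    (PySem.List.sorted xs (fun v => v) false)).1

-- ===== PRECONDITION & SPEC =====
-- Pre_ excludes exactly the inputs where Python A raises ZeroDivisionError: any list of
-- two or more numbers containing 0 (the pair loop then always evaluates x % 0 or recurses
-- into a list that still contains the 0 before any base case can be reached).
def Pre_solve (xs : List Int) (target : Int) : Prop := xs.length ≤ 1 ∨ (0 : Int) ∉ xs
instance (xs : List Int) (target : Int) : Decidable (Pre_solve xs target) := by
  unfold Pre_solve; infer_instance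

def pvWitness_solve : List Int × Int := ([2, 3, 4], 9)

def Spec_solve (xs : List Int) (target : Int) (out : Bool) : Prop := out = solve_alt xs target
instance (xs : List Int) (target : Int) (out : Bool) : Decidable (Spec_solve xs target out) := by
  unfold Spec_solve; infer_instance

-- ===== CLAIM (what is proved, stated in full; the proofs are below) =====
def Claim_equal_solve : Prop := ∀ (xs : List Int) (target : Int), Dom_solve xs target → Pre_solve xs target → Spec_solve xs target (solve xs target)

-- ===== LEMMAS AND PROOFS =====

-- The reachability predicate both ports compute: RP t f xs holds iff from the multiset xs
-- one can reach exactly [t] by repeatedly replacing two elements with a combination,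
-- within f levels.  It is manifestly permutation-invariant.
def RP (t : Int) : Nat → List Int → Prop
  | 0, _ => False
  | f + 1, xs =>
    xs = [t] ∨ ∃ x y rest, xs.Perm (x :: y :: rest) ∧ ∃ z ∈ pvCands x y, RP t f (rest ++ [z])

-- the list both Pythons build for the pair at positions (j, i), j < i
def restA (xs : List Int) (j i : Nat) : List Int :=
  xs.take j ++ ((xs.drop (j + 1)).take (i - (j + 1)) ++ xs.drop (i + 1))

-- "some admissible pair at indices j < i leads to success at fuel f"
def PairEx (t : Int) (f : Nat) (xs : List Int) : Prop :=
  ∃ i j : Nat, j < i ∧ i < xs.length ∧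
    ∃ z ∈ pvCands (xs.getD i 0) (xs.getD j 0), RP t f (restA xs j i ++ [z])

lemma mem_pvCands (x y w : Int) :
    w ∈ pvCands x y ↔
      ((w = x + y ∨ w = x - y ∨ w = y - x ∨ w = x * y) ∧ 0 < w) ∨
      (PySem.Int.mod x y = 0 ∧ w = PySem.Int.floordiv x y) ∨
      (PySem.Int.mod y x = 0 ∧ w = PySem.Int.floordiv y x) := by
  unfold pvCands
  split_ifs with h1 h2 h3
  all_goals simp_all [PySem.Set.mem_add, PySem.Set.mem_ofList, List.mem_filter]
  all_goals tauto

lemma quad_comm (x y w : Int) :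
    (w = x + y ∨ w = x - y ∨ w = y - x ∨ w = x * y) ↔
    (w = y + x ∨ w = y - x ∨ w = x - y ∨ w = y * x) := by
  constructor <;> rintro (rfl | rfl | rfl | rfl)
  · exact Or.inl (add_comm x y)
  · exact Or.inr (Or.inr (Or.inl rfl))
  · exact Or.inr (Or.inl rfl)
  · exact Or.inr (Or.inr (Or.inr (mul_comm x y)))
  · exact Or.inl (add_comm y x)
  · exact Or.inr (Or.inr (Or.inl rfl))
  · exact Or.inr (Or.inl rfl)
  · exact Or.inr (Or.inr (Or.inr (mul_comm y x)))

lemma pvCands_comm (x y w : Int) : w ∈ pvCands x y ↔ w ∈ pvCands y x := by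
  rw [mem_pvCands, mem_pvCands, quad_comm]
  tauto

lemma RP_perm {t : Int} {f : Nat} {xs ys : List Int} (h : xs.Perm ys) :
    RP t f xs ↔ RP t f ys := by
  cases f with
  | zero => simp [RP]
  | succ f =>
    simp only [RP]
    constructor
    · rintro (rfl | ⟨x, y, rest, hp, hz⟩)
      · exact Or.inl (List.perm_singleton.mp h.symm)
      · exact Or.inr ⟨x, y, rest, h.symm.trans hp, hz⟩
    · rintro (rfl | ⟨x, y, rest, hp, hz⟩)
      · exact Or.inl (List.perm_singleton.mp h)
      · exact Or.inr ⟨x, y, rest, h.trans hp, hz⟩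

lemma restA_length {xs : List Int} {j i : Nat} (hji : j < i) (hi : i < xs.length) :
    (restA xs j i).length = xs.length - 2 := by
  simp [restA]
  omega

-- decomposition of xs at two positions j < i
lemma decomp_two {xs : List Int} {j i : Nat} (hji : j < i) (hi : i < xs.length) :
    xs = xs.take j ++ (xs.getD j 0 :: ((xs.drop (j + 1)).take (i - (j + 1)) ++
      (xs.getD i 0 :: xs.drop (i + 1)))) := by
  have hj : j < xs.length := lt_trans hji hi
  have e1 : xs.drop j = xs.getD j 0 :: xs.drop (j + 1) := by
    rw [List.getD_eq_getElem _ _ hj]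
    exact List.drop_eq_getElem_cons hj
  have e3 : xs.drop i = xs.getD i 0 :: xs.drop (i + 1) := by
    rw [List.getD_eq_getElem _ _ hi]
    exact List.drop_eq_getElem_cons hi
  have e2 : xs.drop (j + 1) =
      (xs.drop (j + 1)).take (i - (j + 1)) ++ (xs.getD i 0 :: xs.drop (i + 1)) := by
    conv_lhs => rw [← List.take_append_drop (i - (j + 1)) (xs.drop (j + 1))]
    rw [List.drop_drop, show j + 1 + (i - (j + 1)) = i from by omega, e3]
  conv_lhs => rw [← List.take_append_drop j xs, e1, e2]

lemma pick2_perm {xs : List Int} {j i : Nat} (hji : j < i) (hi : i < xs.length) :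
    xs.Perm (xs.getD i 0 :: xs.getD j 0 :: restA xs j i) := by
  have e := decomp_two hji hi
  have s2 : ((xs.take j ++ (xs.drop (j + 1)).take (i - (j + 1))) ++
      (xs.getD i 0 :: xs.drop (i + 1))).Perm (xs.getD i 0 :: restA xs j i) := by
    have h := List.perm_middle (a := xs.getD i 0)
      (l₁ := xs.take j ++ (xs.drop (j + 1)).take (i - (j + 1))) (l₂ := xs.drop (i + 1))
    simpa [restA, List.append_assoc] using h
  have s2' : (xs.take j ++ ((xs.drop (j + 1)).take (i - (j + 1)) ++
      (xs.getD i 0 :: xs.drop (i + 1)))).Perm (xs.getD i 0 :: restA xs j i) := by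
    rw [← List.append_assoc]
    exact s2
  have s3 : xs.Perm (xs.getD j 0 :: (xs.take j ++ ((xs.drop (j + 1)).take (i - (j + 1)) ++
      (xs.getD i 0 :: xs.drop (i + 1))))) := by
    conv_lhs => rw [e]
    exact List.perm_middle
  exact s3.trans ((s2'.cons _).trans (List.Perm.swap _ _ _))

lemma getD_append_len (l1 l2 : List Int) (x : Int) :
    (l1 ++ x :: l2).getD l1.length 0 = x := by
  induction l1 with
  | nil => rfl
  | cons a l ih => simpa using ih

-- from a permutation selecting two elements, recover loop indices
lemma perm_to_indices {xs : List Int} {x y : Int} {rest : List Int}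
    (h : xs.Perm (x :: y :: rest)) :
    ∃ i j : Nat, j < i ∧ i < xs.length ∧
      ((xs.getD i 0 = x ∧ xs.getD j 0 = y) ∨ (xs.getD i 0 = y ∧ xs.getD j 0 = x)) ∧
      (restA xs j i).Perm rest := by
  have hx : x ∈ xs := h.mem_iff.mpr (by simp)
  obtain ⟨l1, l2, rfl⟩ := List.append_of_mem hx
  have hr : (l1 ++ l2).Perm (y :: rest) := (List.perm_middle.symm.trans h).cons_inv
  have hy : y ∈ l1 ++ l2 := hr.mem_iff.mpr (by simp)
  have main : ∃ i j : Nat, j < i ∧ i < (l1 ++ x :: l2).length ∧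
      (((l1 ++ x :: l2).getD i 0 = x ∧ (l1 ++ x :: l2).getD j 0 = y) ∨
       ((l1 ++ x :: l2).getD i 0 = y ∧ (l1 ++ x :: l2).getD j 0 = x)) := by
    rcases List.mem_append.mp hy with hy1 | hy2
    · obtain ⟨m1, m2, rfl⟩ := List.append_of_mem hy1
      refine ⟨(m1 ++ y :: m2).length, m1.length,
        by simp only [List.length_append, List.length_cons]; omega,
        by simp only [List.length_append, List.length_cons]; omega, Or.inl ⟨?_, ?_⟩⟩
      · exact getD_append_len (m1 ++ y :: m2) l2 x
      · have e : (m1 ++ y :: m2) ++ x :: l2 = m1 ++ y :: (m2 ++ x :: l2) := by simp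
        rw [e]
        exact getD_append_len m1 (m2 ++ x :: l2) y
    · obtain ⟨m1, m2, rfl⟩ := List.append_of_mem hy2
      refine ⟨(l1 ++ x :: m1).length, l1.length,
        by simp only [List.length_append, List.length_cons]; omega,
        by simp only [List.length_append, List.length_cons]; omega, Or.inr ⟨?_, ?_⟩⟩
      · have e : l1 ++ x :: (m1 ++ y :: m2) = (l1 ++ x :: m1) ++ y :: m2 := by simp
        rw [e]
        exact getD_append_len (l1 ++ x :: m1) m2 y
      · exact getD_append_len l1 (m1 ++ y :: m2) x
  obtain ⟨i, j, hji, hi, hvals⟩ := main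
  refine ⟨i, j, hji, hi, hvals, ?_⟩
  have p2 := pick2_perm (xs := l1 ++ x :: l2) hji hi
  rcases hvals with ⟨e1, e2⟩ | ⟨e1, e2⟩
  · rw [e1, e2] at p2
    exact (p2.symm.trans h).cons_inv.cons_inv
  · rw [e1, e2] at p2
    have hsw : (y :: x :: restA (l1 ++ x :: l2) j i).Perm (y :: x :: rest) :=
      (p2.symm.trans h).trans (List.Perm.swap y x rest)
    exact hsw.cons_inv.cons_inv

lemma RP_succ_iff (t : Int) (f : Nat) (xs : List Int) :
    RP t (f + 1) xs ↔ xs = [t] ∨ PairEx t f xs := by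
  simp only [RP]
  constructor
  · rintro (rfl | ⟨x, y, rest, hp, z, hz, hrp⟩)
    · exact Or.inl rfl
    · obtain ⟨i, j, hji, hi, hvals, hperm⟩ := perm_to_indices hp
      refine Or.inr ⟨i, j, hji, hi, z, ?_, ?_⟩
      · rcases hvals with ⟨e1, e2⟩ | ⟨e1, e2⟩
        · rw [e1, e2]; exact hz
        · rw [e1, e2]; exact (pvCands_comm x y z).mp hz
      · exact (RP_perm (hperm.append (List.Perm.refl [z]))).mpr hrp
  · rintro (rfl | ⟨i, j, hji, hi, z, hz, hrp⟩)
    · exact Or.inl rfl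
    · exact Or.inr ⟨xs.getD i 0, xs.getD j 0, restA xs j i, pick2_perm hji hi, z, hz, hrp⟩

lemma getD_take {xs : List Int} {k l : Nat} (h : l < k) :
    (xs.take k).getD l 0 = xs.getD l 0 := by
  simp [List.getD_eq_getElem?_getD, List.getElem?_take, h]

lemma RP_singleton (t a : Int) (f : Nat) : RP t (f + 1) [a] ↔ a = t := by
  simp only [RP]
  constructor
  · rintro (h | ⟨x, y, rest, hp, _⟩)
    · simpa using h
    · have := hp.length_eq
      simp at this
  · rintro rfl
    exact Or.inl rfl

lemma solveA_iff (t : Int) : ∀ (f : Nat) (xs : List Int), solveA t f xs = true ↔ RP t f xs := by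
  intro f
  induction f with
  | zero => intro xs; simp [solveA, RP]
  | succ f ih =>
    intro xs
    rw [RP_succ_iff]
    by_cases hxt : xs = [t]
    · simp [solveA, hxt]
    · simp only [solveA, if_neg hxt]
      constructor
      · intro h
        obtain ⟨p, hpmem, hp⟩ := List.any_eq_true.mp h
        obtain ⟨k, hk, rfl⟩ := (PySem.List.mem_enumerate_iff _ _ _).mp hpmem
        dsimp only at hp
        rw [zero_add, PySem.List.slice_to_natCast] at hp
        obtain ⟨q, hqmem, hq⟩ := List.any_eq_true.mp hp
        obtain ⟨l, hl, rfl⟩ := (PySem.List.mem_enumerate_iff _ _ _).mp hqmem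
        dsimp only at hq
        rw [zero_add] at hq
        have hlk : l < k := by
          simp only [List.length_take] at hl
          omega
        obtain ⟨z, hz, hrec⟩ := List.any_eq_true.mp hq
        refine Or.inr ⟨k, l, hlk, hk, z, ?_, ?_⟩
        · have ek : xs.getD k 0 = xs[k] := List.getD_eq_getElem _ _ hk
          have el : xs.getD l 0 = (xs.take k)[l]'hl := by
            rw [← getD_take hlk, List.getD_eq_getElem]
          rw [ek, el]
          exact hz
        · have ec1 : ((l : Int) + 1) = ((l + 1 : Nat) : Int) := by push_cast; ring
          have ec2 : ((k : Int) + 1) = ((k + 1 : Nat) : Int) := by push_cast; ring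
          rw [PySem.List.slice_to_natCast, ec1, ec2, PySem.List.slice_natCast,
            PySem.List.slice_from_natCast] at hrec
          have hr := (ih _).mp hrec
          have : RP t f (restA xs l k ++ [z]) ↔
              RP t f (xs.take l ++ List.take (k - (l + 1)) (List.drop (l + 1) xs) ++
                List.drop (k + 1) xs ++ [z]) := by
            rw [restA, ← List.append_assoc]
          exact this.mpr hr
      · rintro (h | ⟨i, j, hji, hi, z, hz, hrp⟩)
        · exact absurd h hxt
        · apply List.any_eq_true.mpr
          refine ⟨((i : Int), xs[i]'hi),
            (PySem.List.mem_enumerate_iff _ _ _).mpr ⟨i, hi, by rw [zero_add]⟩, ?_⟩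
          dsimp only
          rw [PySem.List.slice_to_natCast]
          apply List.any_eq_true.mpr
          have hjlen : j < (xs.take i).length := by
            simp only [List.length_take]
            omega
          refine ⟨((j : Int), (xs.take i)[j]'hjlen),
            (PySem.List.mem_enumerate_iff _ _ _).mpr ⟨j, hjlen, by rw [zero_add]⟩, ?_⟩
          dsimp only
          apply List.any_eq_true.mpr
          refine ⟨z, ?_, ?_⟩
          · rw [List.getD_eq_getElem _ _ hi] at hz
            rw [List.getD_eq_getElem _ _ (lt_trans hji hi)] at hz
            rw [List.getElem_take]
            exact hz
          · have ec1 : ((j : Int) + 1) = ((j + 1 : Nat) : Int) := by push_cast; ring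
            have ec2 : ((i : Int) + 1) = ((i + 1 : Nat) : Int) := by push_cast; ring
            rw [PySem.List.slice_to_natCast, ec1, ec2, PySem.List.slice_natCast,
              PySem.List.slice_from_natCast]
            apply (ih _).mpr
            have : RP t f (restA xs j i ++ [z]) ↔
                RP t f (xs.take j ++ List.take (i - (j + 1)) (List.drop (j + 1) xs) ++
                  List.drop (i + 1) xs ++ [z]) := by
              rw [restA, ← List.append_assoc]
            exact this.mp hrp

-- memo invariant: every stored entry is the truth of RP at the canonical fuel
def pvInv (t : Int) (m : PySem.Dict (List Int) Bool) : Prop :=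
  ∀ k b, m.get? k = some b → (b = true ↔ RP t (k.length + 1) k)

lemma candLoop_spec (t : Int) (f : Nat) (rest : List Int)
    (hf : rest.length + 2 ≤ f)
    (IH : ∀ (ms : List Int) (m : PySem.Dict (List Int) Bool), ms.length + 1 ≤ f → pvInv t m →
      pvInv t (pvReach t f m ms).2 ∧ ((pvReach t f m ms).1 = true ↔ RP t (ms.length + 1) ms)) :
    ∀ (zs : List Int) (m : PySem.Dict (List Int) Bool), pvInv t m →
      pvInv t (pvCandLoop (pvReach t f) rest zs m).2 ∧
      ((pvCandLoop (pvReach t f) rest zs m).1 = true ↔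
        ∃ z ∈ zs, RP t (rest.length + 2) (rest ++ [z])) := by
  intro zs
  induction zs with
  | nil =>
    intro m hm
    simp only [pvCandLoop]
    exact ⟨hm, by simp⟩
  | cons z zs ihz =>
    intro m hm
    have hsl : (PySem.List.sorted (rest ++ [z]) (fun v => v) false).length = rest.length + 1 := by
      rw [PySem.List.length_sorted]
      simp
    have hperm : (PySem.List.sorted (rest ++ [z]) (fun v => v) false).Perm (rest ++ [z]) :=
      PySem.List.sorted_perm _ _ _
    obtain ⟨hm', hiff⟩ := IH (PySem.List.sorted (rest ++ [z]) (fun v => v) false) m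
      (by rw [hsl]; omega) hm
    have hiff' : (pvReach t f m (PySem.List.sorted (rest ++ [z]) (fun v => v) false)).1 = true ↔
        RP t (rest.length + 2) (rest ++ [z]) := by
      rw [hiff, hsl, RP_perm hperm]
    simp only [pvCandLoop]
    rcases hpr : pvReach t f m (PySem.List.sorted (rest ++ [z]) (fun v => v) false) with ⟨r, m2⟩
    rw [hpr] at hm' hiff'
    dsimp only
    split_ifs with hres
    · refine ⟨hm', ?_⟩
      simp only [true_iff, List.mem_cons]
      exact ⟨z, Or.inl rfl, hiff'.mp hres⟩
    · obtain ⟨hm'', hiff''⟩ := ihz _ hm'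
      refine ⟨hm'', ?_⟩
      rw [hiff'']
      simp only [List.mem_cons]
      constructor
      · rintro ⟨w, hw, hrw⟩
        exact ⟨w, Or.inr hw, hrw⟩
      · rintro ⟨w, rfl | hw, hrw⟩
        · exact absurd (hiff'.mpr hrw) hres
        · exact ⟨w, hw, hrw⟩

lemma jLoop_spec (t : Int) (f : Nat) (ms : List Int) (i : Int)
    (hf : ms.length ≤ f) (h2 : 2 ≤ ms.length)
    (hi0 : 0 ≤ i) (hin : i < (ms.length : Int))
    (IH : ∀ (ns : List Int) (m : PySem.Dict (List Int) Bool), ns.length + 1 ≤ f → pvInv t m →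
      pvInv t (pvReach t f m ns).2 ∧ ((pvReach t f m ns).1 = true ↔ RP t (ns.length + 1) ns)) :
    ∀ (js : List Int) (m : PySem.Dict (List Int) Bool),
      (∀ j ∈ js, 0 ≤ j ∧ j < i) → pvInv t m →
      pvInv t (pvJLoop (pvReach t f) ms i js m).2 ∧
      ((pvJLoop (pvReach t f) ms i js m).1 = true ↔
        ∃ j ∈ js, ∃ z ∈ pvCands (ms.getD i.toNat 0) (ms.getD j.toNat 0),
          RP t ms.length (restA ms j.toNat i.toNat ++ [z])) := by
  intro js
  induction js with
  | nil =>
    intro m hjs hm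
    simp only [pvJLoop]
    exact ⟨hm, by simp⟩
  | cons j js ihj =>
    intro m hjs hm
    obtain ⟨hj0, hji⟩ := hjs j List.mem_cons_self
    have hrest : PySem.List.slice ms none (some j) ++
        PySem.List.slice ms (some (j + 1)) (some i) ++
        PySem.List.slice ms (some (i + 1)) none = restA ms j.toNat i.toNat := by
      rw [PySem.List.slice_to ms hj0, PySem.List.slice_toNat ms (by omega) hi0,
        PySem.List.slice_from ms (by omega),
        show (j + 1).toNat = j.toNat + 1 from by omega,
        show (i + 1).toNat = i.toNat + 1 from by omega,
        restA, ← List.append_assoc]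
    have hjiN : j.toNat < i.toNat := by omega
    have hiN : i.toNat < ms.length := by omega
    have hrl : (restA ms j.toNat i.toNat).length + 2 = ms.length := by
      rw [restA_length hjiN hiN]
      omega
    have hx : PySem.List.pyGetD ms i 0 = ms.getD i.toNat 0 := PySem.List.pyGetD_of_nonneg ms 0 hi0
    have hy : PySem.List.pyGetD ms j 0 = ms.getD j.toNat 0 := PySem.List.pyGetD_of_nonneg ms 0 hj0
    simp only [pvJLoop, hrest, hx, hy]
    obtain ⟨hm', hiff⟩ := candLoop_spec t f (restA ms j.toNat i.toNat) (by omega) IH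
      (pvCands (ms.getD i.toNat 0) (ms.getD j.toNat 0)) m hm
    rcases hcl : pvCandLoop (pvReach t f) (restA ms j.toNat i.toNat)
      (pvCands (ms.getD i.toNat 0) (ms.getD j.toNat 0)) m with ⟨r, m2⟩
    rw [hcl] at hm' hiff
    dsimp only
    split_ifs with hres
    · refine ⟨hm', ?_⟩
      simp only [true_iff, List.mem_cons]
      obtain ⟨z, hz, hrz⟩ := hiff.mp hres
      exact ⟨j, Or.inl rfl, z, hz, by rwa [← hrl]⟩
    · obtain ⟨hm'', hiff''⟩ := ihj _ (fun w hw => hjs w (List.mem_cons_of_mem _ hw)) hm'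
      refine ⟨hm'', ?_⟩
      rw [hiff'']
      simp only [List.mem_cons]
      constructor
      · rintro ⟨w, hw, hrw⟩
        exact ⟨w, Or.inr hw, hrw⟩
      · rintro ⟨w, rfl | hw, hrw⟩
        · refine absurd (hiff.mpr ?_) hres
          obtain ⟨z, hz, hrz⟩ := hrw
          exact ⟨z, hz, by rwa [hrl]⟩
        · exact ⟨w, hw, hrw⟩

lemma iLoop_spec (t : Int) (f : Nat) (ms : List Int)
    (hf : ms.length ≤ f) (h2 : 2 ≤ ms.length)
    (IH : ∀ (ns : List Int) (m : PySem.Dict (List Int) Bool), ns.length + 1 ≤ f → pvInv t m →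
      pvInv t (pvReach t f m ns).2 ∧ ((pvReach t f m ns).1 = true ↔ RP t (ns.length + 1) ns)) :
    ∀ (is : List Int) (m : PySem.Dict (List Int) Bool),
      (∀ i ∈ is, 0 ≤ i ∧ i < (ms.length : Int)) → pvInv t m →
      pvInv t (pvILoop (pvReach t f) ms is m).2 ∧
      ((pvILoop (pvReach t f) ms is m).1 = true ↔
        ∃ i ∈ is, ∃ j : Int, 0 ≤ j ∧ j < i ∧
          ∃ z ∈ pvCands (ms.getD i.toNat 0) (ms.getD j.toNat 0),
            RP t ms.length (restA ms j.toNat i.toNat ++ [z])) := by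
  intro is
  induction is with
  | nil =>
    intro m his hm
    simp only [pvILoop]
    exact ⟨hm, by simp⟩
  | cons i is ihi =>
    intro m his hm
    obtain ⟨hi0, hin⟩ := his i List.mem_cons_self
    obtain ⟨hm', hiff⟩ := jLoop_spec t f ms i hf h2 hi0 hin IH (PySem.List.pyRange 0 i 1) m
      (fun w hw => PySem.List.mem_pyRange_one.mp hw) hm
    simp only [pvILoop]
    rcases hjl : pvJLoop (pvReach t f) ms i (PySem.List.pyRange 0 i 1) m with ⟨r, m2⟩
    rw [hjl] at hm' hiff
    dsimp only
    split_ifs with hres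
    · refine ⟨hm', ?_⟩
      simp only [true_iff, List.mem_cons]
      obtain ⟨j, hj, hrest⟩ := hiff.mp hres
      have hjb := PySem.List.mem_pyRange_one.mp hj
      exact ⟨i, Or.inl rfl, j, hjb.1, hjb.2, hrest⟩
    · obtain ⟨hm'', hiff''⟩ := ihi _ (fun w hw => his w (List.mem_cons_of_mem _ hw)) hm'
      refine ⟨hm'', ?_⟩
      rw [hiff'']
      simp only [List.mem_cons]
      constructor
      · rintro ⟨w, hw, hrw⟩
        exact ⟨w, Or.inr hw, hrw⟩
      · rintro ⟨w, rfl | hw, hrw⟩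
        · refine absurd (hiff.mpr ?_) hres
          obtain ⟨j, hj0, hji, hrest⟩ := hrw
          exact ⟨j, PySem.List.mem_pyRange_one.mpr ⟨hj0, hji⟩, hrest⟩
        · exact ⟨w, hw, hrw⟩

lemma pvReach_spec (t : Int) :
    ∀ (f : Nat) (ms : List Int) (m : PySem.Dict (List Int) Bool),
      ms.length + 1 ≤ f → pvInv t m →
      pvInv t (pvReach t f m ms).2 ∧ ((pvReach t f m ms).1 = true ↔ RP t (ms.length + 1) ms) := by
  intro f
  induction f with
  | zero =>
    intro ms m hf
    exact absurd hf (by omega)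
  | succ f ih =>
    intro ms m hf hm
    simp only [pvReach]
    cases hget : PySem.Dict.get? m ms with
    | some r => exact ⟨hm, hm ms r hget⟩
    | none =>
      have key : ∀ (p : Bool × PySem.Dict (List Int) Bool),
          pvInv t p.2 → (p.1 = true ↔ RP t (ms.length + 1) ms) →
          pvInv t (PySem.Dict.insert p.2 ms p.1) ∧
            (p.1 = true ↔ RP t (ms.length + 1) ms) := by
        rintro ⟨b, m'⟩ hm' hb
        refine ⟨?_, hb⟩
        intro k v hkv
        by_cases hk : k = ms
        · subst hk
          rw [PySem.Dict.get?_insert_self] at hkv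
          cases hkv
          exact hb
        · rw [PySem.Dict.get?_insert_of_ne m' b hk] at hkv
          exact hm' k v hkv
      by_cases h1 : ms.length = 1
      · rw [if_pos h1]
        obtain ⟨a, ha⟩ : ∃ a, ms = [a] := by
          cases ms with
          | nil => simp at h1
          | cons a l =>
            cases l with
            | nil => exact ⟨a, rfl⟩
            | cons b l2 => simp at h1
        subst ha
        refine key (PySem.List.pyGetD [a] 0 0 == t, m) hm ?_
        have hga : PySem.List.pyGetD [a] 0 0 = a := by
          rw [PySem.List.pyGetD_of_nonneg [a] 0 (by omega)]
          rfl
        dsimp only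
        rw [hga, RP_singleton]
        simp
      · rw [if_neg h1]
        by_cases h0 : ms.length = 0
        · have hnil := List.length_eq_zero_iff.mp h0
          subst hnil
          have hr0 : PySem.List.pyRange 0 ((([] : List Int)).length : Int) 1 = [] :=
            PySem.List.pyRange_one_eq_nil (by simp)
          rw [hr0]
          refine key (pvILoop (pvReach t f) [] [] m) hm ?_
          constructor
          · intro hfalse
            simp [pvILoop] at hfalse
          · intro hrp
            rcases (RP_succ_iff t _ _).mp hrp with habs | ⟨i, j, hji, hi, _⟩
            · simp at habs
            · simp at hi
        · have h2 : 2 ≤ ms.length := by omega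
          obtain ⟨hm', hiff⟩ := iLoop_spec t f ms (by omega) h2 ih
            (PySem.List.pyRange 0 (ms.length : Int) 1) m
            (fun w hw => PySem.List.mem_pyRange_one.mp hw) hm
          rcases hIL : pvILoop (pvReach t f) ms (PySem.List.pyRange 0 (ms.length : Int) 1) m
            with ⟨rb, mb⟩
          rw [hIL] at hm' hiff
          refine key (rb, mb) hm' ?_
          rw [hiff, RP_succ_iff]
          have hne : ms ≠ [t] := by
            intro habs
            rw [habs] at h1
            simp at h1
          simp only [hne, false_or]
          constructor
          · rintro ⟨i, hi, j, hj0, hji, z, hz, hrest⟩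
            have hib := PySem.List.mem_pyRange_one.mp hi
            exact ⟨i.toNat, j.toNat, by omega, by omega, z, hz, hrest⟩
          · rintro ⟨i, j, hji, hi, z, hz, hrest⟩
            refine ⟨(i : Int), PySem.List.mem_pyRange_one.mpr ⟨by omega, by omega⟩,
              (j : Int), by omega, by omega, z, ?_, ?_⟩
            · simpa using hz
            · simpa using hrest

-- ===== VERDICT (by name: the statement is the Claim_ definition above) =====
theorem solve_spec : Claim_equal_solve := by
  unfold Claim_equal_solve
  intro xs t _ _
  unfold Spec_solve solve solve_alt
  by_cases hxt : xs = [t]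
  · subst hxt
    simp [solveA]
  · rw [if_neg hxt]
    have hempty : pvInv t PySem.Dict.empty := by
      intro k b hkb
      rw [PySem.Dict.get?_empty] at hkb
      cases hkb
    have hlen : (PySem.List.sorted xs (fun v => v) false).length + 1 ≤ xs.length + 1 := by
      rw [PySem.List.length_sorted]
    obtain ⟨_, hiff⟩ := pvReach_spec t (xs.length + 1)
      (PySem.List.sorted xs (fun v => v) false) PySem.Dict.empty hlen hempty
    have hperm : (PySem.List.sorted xs (fun v => v) false).Perm xs :=
      PySem.List.sorted_perm _ _ _
    have h2 : (pvReach t (xs.length + 1) PySem.Dict.empty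
        (PySem.List.sorted xs (fun v => v) false)).1 = true ↔ RP t (xs.length + 1) xs := by
      rw [hiff, PySem.List.length_sorted, RP_perm hperm]
    have h1 : solveA t (xs.length + 1) xs = true ↔ RP t (xs.length + 1) xs :=
      solveA_iff t (xs.length + 1) xs
    exact Bool.eq_iff_iff.mpr (h1.trans h2.symm)
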